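-- pv_equiv track=rewrite | github.com/ThalenVassen/python-learning | 011_functions.py | second_max
-- ===== SOURCE A (Python) =====
-- def second_max(numbers):
--     list_max_even_number = None
--     list_max_odd_number = None
--     for i in numbers:
--         if i %2==0:
--             if list_max_even_number is None or i> list_max_even_number:
--                 list_max_even_number = i
--         elif list_max_odd_number is None or i<list_max_odd_number:
--             list_max_odd_number = i
--
--     return list_max_even_number, list_max_odd_number
-- ===== SOURCE B (Python) =====
-- def second_max(numbers):
--     evens = [i for i in numbers if i % 2 == 0]
--     odds = [i for i in numbers if i % 2 != 0]
--     return (max(evens) if evens else None, min(odds) if odds else None)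
-- ===== Notes on version B (the rewrite author's own statement) =====
-- stated objective: simpler
-- what changed: Replaces the single fused two-accumulator loop by a partition into evens/odds via comprehensions followed by two independent max/min reductions.
import Mathlib
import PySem

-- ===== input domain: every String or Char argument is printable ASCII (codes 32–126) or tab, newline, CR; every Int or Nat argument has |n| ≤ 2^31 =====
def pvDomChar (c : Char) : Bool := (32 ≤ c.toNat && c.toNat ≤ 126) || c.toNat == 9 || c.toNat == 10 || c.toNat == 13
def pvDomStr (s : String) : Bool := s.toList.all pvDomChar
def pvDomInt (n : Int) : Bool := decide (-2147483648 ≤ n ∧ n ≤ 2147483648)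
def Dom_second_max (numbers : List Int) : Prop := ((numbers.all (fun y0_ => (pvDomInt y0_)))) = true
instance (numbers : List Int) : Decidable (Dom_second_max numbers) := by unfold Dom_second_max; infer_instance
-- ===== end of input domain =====

-- B replaces A's fused two-accumulator loop by a partition into evens/odds plus two
-- independent max/min reductions (objective: simpler).

-- ===== PORT A =====
-- the loop body of A: update max-even on even i, else update min-odd
def secondMaxStep (st : Option Int × Option Int) (i : Int) : Option Int × Option Int :=
  if PySem.Int.mod i 2 = 0 then
    match st.1 with
    | none => (some i, st.2)
    | some m => if m < i then (some i, st.2) else st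
  else
    match st.2 with
    | none => (st.1, some i)
    | some m => if i < m then (st.1, some i) else st

def second_max (numbers : List Int) : Option Int × Option Int :=
  numbers.foldl secondMaxStep (none, none)

-- ===== PORT B =====
def second_max_alt (numbers : List Int) : Option Int × Option Int :=
  let evens := numbers.filter (fun i => decide (PySem.Int.mod i 2 = 0))
  let odds := numbers.filter (fun i => decide (¬ PySem.Int.mod i 2 = 0))
  (PySem.List.max? evens (fun x => x), PySem.List.min? odds (fun x => x))

-- ===== PRECONDITION & SPEC =====
def Spec_second_max (numbers : List Int) (out : Option Int × Option Int) : Prop := out = second_max_alt numbers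
instance (numbers : List Int) (out : Option Int × Option Int) : Decidable (Spec_second_max numbers out) := by unfold Spec_second_max; infer_instance

-- ===== CLAIM (what is proved, stated in full; the proofs are below) =====
def Claim_equal_second_max : Prop := ∀ (numbers : List Int), Dom_second_max numbers → Spec_second_max numbers (second_max numbers)

-- ===== LEMMAS AND PROOFS =====

-- max-even accumulator update in isolation
def stepE (o : Option Int) (i : Int) : Option Int :=
  match o with
  | none => some i
  | some m => if m < i then some i else some m

-- min-odd accumulator update in isolation
def stepO (o : Option Int) (i : Int) : Option Int :=
  match o with
  | none => some i
  | some m => if i < m then some i else some m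

theorem foldl_step_split (l : List Int) (a b : Option Int) :
    l.foldl secondMaxStep (a, b) =
      ((l.filter (fun i => decide (PySem.Int.mod i 2 = 0))).foldl stepE a,
       (l.filter (fun i => decide (¬ PySem.Int.mod i 2 = 0))).foldl stepO b) := by
  induction l generalizing a b with
  | nil => rfl
  | cons x t ih =>
    by_cases hx : PySem.Int.mod x 2 = 0
    · simp only [List.foldl_cons, List.filter_cons, hx, decide_true, not_true, decide_false,
        if_true]
      rw [show secondMaxStep (a, b) x = (stepE a x, b) by
        unfold secondMaxStep
        rw [if_pos hx]
        cases a with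
        | none => rfl
        | some m => by_cases h : m < x <;> simp [stepE, h]]
      exact ih _ _
    · simp only [List.foldl_cons, List.filter_cons, hx, decide_false, not_false_iff, decide_true,
        if_true]
      rw [show secondMaxStep (a, b) x = (a, stepO b x) by
        unfold secondMaxStep
        rw [if_neg hx]
        cases b with
        | none => rfl
        | some m => by_cases h : x < m <;> simp [stepO, h]]
      exact ih _ _

theorem foldl_stepE_some (t : List Int) (m : Int) :
    t.foldl stepE (some m) = some (t.foldl max m) := by
  induction t generalizing m with
  | nil => rfl
  | cons x s ih =>
    simp only [List.foldl_cons, stepE]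
    rw [show (if m < x then some x else some m) = some (max m x) by
      rcases lt_or_ge m x with h | h
      · simp [h, max_eq_right h.le]
      · simp [not_lt.mpr h, max_eq_left h]]
    exact ih _

theorem foldl_stepE_eq_max? (l : List Int) :
    l.foldl stepE none = PySem.List.max? l (fun x => x) := by
  cases l with
  | nil => rfl
  | cons x t =>
    rw [PySem.List.max?_id_cons]
    simpa [stepE] using foldl_stepE_some t x

theorem foldl_stepO_some (t : List Int) (m : Int) :
    t.foldl stepO (some m) = some (t.foldl min m) := by
  induction t generalizing m with
  | nil => rfl
  | cons x s ih =>
    simp only [List.foldl_cons, stepO]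
    rw [show (if x < m then some x else some m) = some (min m x) by
      rcases lt_or_ge x m with h | h
      · simp [h, min_eq_right h.le]
      · simp [not_lt.mpr h, min_eq_left h]]
    exact ih _

theorem foldl_stepO_eq_min? (l : List Int) :
    l.foldl stepO none = PySem.List.min? l (fun x => x) := by
  cases l with
  | nil => rfl
  | cons x t =>
    rw [PySem.List.min?_id_cons]
    simpa [stepO] using foldl_stepO_some t x

-- ===== VERDICT (by name: the statement is the Claim_ definition above) =====
theorem second_max_spec : Claim_equal_second_max := by
  intro numbers _
  unfold Spec_second_max second_max second_max_alt
  rw [foldl_step_split, foldl_stepE_eq_max?, foldl_stepO_eq_min?]
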